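-- pv_equiv track=rewrite | github.com/LampeB/tactical-rpg-game | tools/generate_backpack_tiers.py | mage_shape_standard
-- ===== SOURCE A (Python) =====
-- def mage_shape_standard(W: int, H: int) -> tuple[list, list]:
--     """
--     Standard mage template (oval pouch):
--       row 0        : cols 1..W-2  (narrow mouth, initial)
--       rows 1..H-3  : all W        (body, initial)
--       row H-2      : all W        (expansion)
--       row H-1      : cols 1..W-2  (tapered bottom, expansion)
--     """
--     initial, expansion = [], []
--     for y in range(H):
--         for x in range(W):
--             if y == 0:
--                 if 1 <= x <= W - 2:
--                     initial.append((x, y))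
--             elif y <= H - 3:
--                 initial.append((x, y))
--             elif y == H - 2:
--                 expansion.append((x, y))
--             else:  # H-1
--                 if 1 <= x <= W - 2:
--                     expansion.append((x, y))
--     return initial, expansion
-- ===== SOURCE B (Python) =====
-- def mage_shape_standard(W: int, H: int) -> tuple[list, list]:
--     """Band-wise construction: build each row band by a direct range
--     comprehension instead of scanning the whole W*H grid with branches."""
--     inner = range(1, W - 1)          # cols 1..W-2
--     initial = ([(x, 0) for x in inner] if H >= 1 else []) \
--         + [(x, y) for y in range(1, H - 2) for x in range(W)]
--     expansion = ([(x, H - 2) for x in range(W)] if H >= 3 else []) \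
--         + ([(x, H - 1) for x in inner] if H >= 2 else [])
--     return initial, expansion
-- ===== Notes on version B (the rewrite author's own statement) =====
-- stated objective: simpler
-- what changed: Replaces the nested W*H grid scan with per-cell branch tests by direct band construction: each of the four row bands is emitted as one range comprehension and the bands are concatenated.
import Mathlib
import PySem

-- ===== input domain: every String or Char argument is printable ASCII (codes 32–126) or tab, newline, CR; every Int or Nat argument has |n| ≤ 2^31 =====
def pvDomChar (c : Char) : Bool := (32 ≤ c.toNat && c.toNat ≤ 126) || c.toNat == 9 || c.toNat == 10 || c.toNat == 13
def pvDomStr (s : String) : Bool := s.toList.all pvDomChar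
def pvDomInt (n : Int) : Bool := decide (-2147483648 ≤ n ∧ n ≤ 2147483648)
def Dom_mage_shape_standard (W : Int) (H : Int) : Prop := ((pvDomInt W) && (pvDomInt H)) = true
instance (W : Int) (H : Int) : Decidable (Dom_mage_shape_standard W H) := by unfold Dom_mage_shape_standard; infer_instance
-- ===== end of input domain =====

-- B builds the four row bands by direct range comprehensions instead of A's full W*H grid scan with branch tests.

-- ===== PORT A =====
-- the body of A's inner 'for x in range(W)' loop, for a fixed row y
def mageRow (W : Int) (H : Int) (st : (List (Int × Int)) × (List (Int × Int))) (y : Int) :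
    (List (Int × Int)) × (List (Int × Int)) :=
  (PySem.List.pyRange 0 W 1).foldl (fun st x =>
    if y = 0 then
      (if 1 ≤ x ∧ x ≤ W - 2 then (st.1 ++ [(x, y)], st.2) else st)
    else if y ≤ H - 3 then (st.1 ++ [(x, y)], st.2)
    else if y = H - 2 then (st.1, st.2 ++ [(x, y)])
    else
      (if 1 ≤ x ∧ x ≤ W - 2 then (st.1, st.2 ++ [(x, y)]) else st)) st

def mage_shape_standard (W : Int) (H : Int) : (List (Int × Int)) × (List (Int × Int)) :=
  (PySem.List.pyRange 0 H 1).foldl (mageRow W H) ([], [])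

-- ===== PORT B =====
def mage_shape_standard_alt (W : Int) (H : Int) : (List (Int × Int)) × (List (Int × Int)) :=
  -- 'inner = range(1, W-1)' is a lazy range in Python; it is inlined at its two use sites here
  let initial :=
    (if H ≥ 1 then (PySem.List.pyRange 1 (W - 1) 1).map (fun x => (x, (0 : Int))) else []) ++
      (PySem.List.pyRange 1 (H - 2) 1).flatMap
        (fun y => (PySem.List.pyRange 0 W 1).map (fun x => (x, y)))
  let expansion :=
    (if H ≥ 3 then (PySem.List.pyRange 0 W 1).map (fun x => (x, H - 2)) else []) ++
      (if H ≥ 2 then (PySem.List.pyRange 1 (W - 1) 1).map (fun x => (x, H - 1)) else [])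
  (initial, expansion)

-- ===== PRECONDITION & SPEC =====
def Spec_mage_shape_standard (W : Int) (H : Int) (out : (List (Int × Int)) × (List (Int × Int))) : Prop := out = mage_shape_standard_alt W H
instance (W : Int) (H : Int) (out : (List (Int × Int)) × (List (Int × Int))) : Decidable (Spec_mage_shape_standard W H out) := by unfold Spec_mage_shape_standard; infer_instance

-- ===== CLAIM (what is proved, stated in full; the proofs are below) =====
def Claim_equal_mage_shape_standard : Prop := ∀ (W : Int) (H : Int), Dom_mage_shape_standard W H → Spec_mage_shape_standard W H (mage_shape_standard W H)

-- ===== LEMMAS AND PROOFS =====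

-- fold that conditionally appends to the first component only
theorem foldl_pair_fst_if {α : Type} (p : Int → Prop) [DecidablePred p] (f : Int → α)
    (l : List Int) (i e : List α) :
    l.foldl (fun st x => if p x then (st.1 ++ [f x], st.2) else st) (i, e)
      = (i ++ (l.filter (fun x => decide (p x))).map f, e) := by
  induction l generalizing i with
  | nil => simp
  | cons a l ih =>
    by_cases h : p a <;> simp [h, ih, List.append_assoc]

-- fold that unconditionally appends to the first component
theorem foldl_pair_fst {α : Type} (f : Int → α) (l : List Int) (i e : List α) :
    l.foldl (fun st x => (st.1 ++ [f x], st.2)) (i, e) = (i ++ l.map f, e) := by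
  induction l generalizing i with
  | nil => simp
  | cons a l ih => simp [ih, List.append_assoc]

-- fold that conditionally appends to the second component only
theorem foldl_pair_snd_if {α : Type} (p : Int → Prop) [DecidablePred p] (f : Int → α)
    (l : List Int) (i e : List α) :
    l.foldl (fun st x => if p x then (st.1, st.2 ++ [f x]) else st) (i, e)
      = (i, e ++ (l.filter (fun x => decide (p x))).map f) := by
  induction l generalizing e with
  | nil => simp
  | cons a l ih =>
    by_cases h : p a <;> simp [h, ih, List.append_assoc]

-- fold that unconditionally appends to the second component
theorem foldl_pair_snd {α : Type} (f : Int → α) (l : List Int) (i e : List α) :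
    l.foldl (fun st x => (st.1, st.2 ++ [f x])) (i, e) = (i, e ++ l.map f) := by
  induction l generalizing e with
  | nil => simp
  | cons a l ih => simp [ih, List.append_assoc]

-- the inner-band filter of the full row is exactly the range 1..W-2
theorem filter_inner (W : Int) :
    ((PySem.List.pyRange 0 W 1).filter (fun x => decide (1 ≤ x ∧ x ≤ W - 2)))
      = PySem.List.pyRange 1 (W - 1) 1 := by
  rcases le_or_gt W 1 with h | h
  · have e1 : PySem.List.pyRange 1 (W - 1) 1 = [] := PySem.List.pyRange_one_eq_nil (by omega)
    rw [e1, List.filter_eq_nil_iff.mpr]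
    intro x hx
    have := (PySem.List.mem_pyRange_one).mp hx
    simp only [decide_eq_true_eq]
    omega
  · have hsplit : PySem.List.pyRange 0 W 1
        = PySem.List.pyRange 0 1 1 ++ PySem.List.pyRange 1 (W - 1) 1 ++ PySem.List.pyRange (W - 1) W 1 := by
      rw [← PySem.List.pyRange_one_append 0 1 (W - 1) (by omega) (by omega),
        ← PySem.List.pyRange_one_append 0 (W - 1) W (by omega) (by omega)]
    have h0 : PySem.List.pyRange 0 1 1 = [(0 : Int)] := PySem.List.pyRange_one_singleton 0
    have h1 : PySem.List.pyRange (W - 1) W 1 = [W - 1] := by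
      have := PySem.List.pyRange_one_singleton (W - 1)
      simpa [show W - 1 + 1 = W by ring] using this
    have hmid : (PySem.List.pyRange 1 (W - 1) 1).filter (fun x => decide (1 ≤ x ∧ x ≤ W - 2))
        = PySem.List.pyRange 1 (W - 1) 1 := by
      apply List.filter_eq_self.mpr
      intro x hx
      have := (PySem.List.mem_pyRange_one).mp hx
      simp only [decide_eq_true_eq]
      omega
    rw [hsplit, List.filter_append, List.filter_append, h0, h1, hmid]
    simp

-- row 0: narrow band appended to `initial`
theorem mageRow_zero (W H : Int) (i e : List (Int × Int)) :
    mageRow W H (i, e) 0 = (i ++ (PySem.List.pyRange 1 (W - 1) 1).map (fun x => (x, (0 : Int))), e) := by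
  unfold mageRow
  have hf : (fun (st : (List (Int × Int)) × (List (Int × Int))) (x : Int) =>
      if (0 : Int) = 0 then
        (if 1 ≤ x ∧ x ≤ W - 2 then (st.1 ++ [(x, (0 : Int))], st.2) else st)
      else if (0 : Int) ≤ H - 3 then (st.1 ++ [(x, (0 : Int))], st.2)
      else if (0 : Int) = H - 2 then (st.1, st.2 ++ [(x, (0 : Int))])
      else
        (if 1 ≤ x ∧ x ≤ W - 2 then (st.1, st.2 ++ [(x, (0 : Int))]) else st))
      = (fun st x => if 1 ≤ x ∧ x ≤ W - 2 then (st.1 ++ [(x, (0 : Int))], st.2) else st) := by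
    funext st x
    rw [if_pos rfl]
  rw [hf, foldl_pair_fst_if (fun x => 1 ≤ x ∧ x ≤ W - 2) (fun x => (x, (0 : Int))), filter_inner]

-- body rows 1..H-3: full band appended to `initial`
theorem mageRow_mid (W H y : Int) (hy : 1 ≤ y) (hy3 : y ≤ H - 3) (i e : List (Int × Int)) :
    mageRow W H (i, e) y = (i ++ (PySem.List.pyRange 0 W 1).map (fun x => (x, y)), e) := by
  unfold mageRow
  have hf : (fun (st : (List (Int × Int)) × (List (Int × Int))) (x : Int) =>
      if y = 0 then
        (if 1 ≤ x ∧ x ≤ W - 2 then (st.1 ++ [(x, y)], st.2) else st)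
      else if y ≤ H - 3 then (st.1 ++ [(x, y)], st.2)
      else if y = H - 2 then (st.1, st.2 ++ [(x, y)])
      else
        (if 1 ≤ x ∧ x ≤ W - 2 then (st.1, st.2 ++ [(x, y)]) else st))
      = (fun st x => (st.1 ++ [(x, y)], st.2)) := by
    funext st x
    rw [if_neg (by omega : ¬ y = 0), if_pos hy3]
  rw [hf]
  exact foldl_pair_fst _ _ _ _

-- row H-2 (for H ≥ 3): full band appended to `expansion`
theorem mageRow_exp (W H : Int) (hH : 3 ≤ H) (i e : List (Int × Int)) :
    mageRow W H (i, e) (H - 2) = (i, e ++ (PySem.List.pyRange 0 W 1).map (fun x => (x, H - 2))) := by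
  unfold mageRow
  have hf : (fun (st : (List (Int × Int)) × (List (Int × Int))) (x : Int) =>
      if H - 2 = 0 then
        (if 1 ≤ x ∧ x ≤ W - 2 then (st.1 ++ [(x, H - 2)], st.2) else st)
      else if H - 2 ≤ H - 3 then (st.1 ++ [(x, H - 2)], st.2)
      else if H - 2 = H - 2 then (st.1, st.2 ++ [(x, H - 2)])
      else
        (if 1 ≤ x ∧ x ≤ W - 2 then (st.1, st.2 ++ [(x, H - 2)]) else st))
      = (fun st x => (st.1, st.2 ++ [(x, H - 2)])) := by
    funext st x
    rw [if_neg (by omega : ¬ H - 2 = 0), if_neg (by omega : ¬ H - 2 ≤ H - 3), if_pos rfl]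
  rw [hf]
  exact foldl_pair_snd _ _ _ _

-- row H-1 (for H ≥ 2): narrow band appended to `expansion`
theorem mageRow_last (W H : Int) (hH : 2 ≤ H) (i e : List (Int × Int)) :
    mageRow W H (i, e) (H - 1) = (i, e ++ (PySem.List.pyRange 1 (W - 1) 1).map (fun x => (x, H - 1))) := by
  unfold mageRow
  have hf : (fun (st : (List (Int × Int)) × (List (Int × Int))) (x : Int) =>
      if H - 1 = 0 then
        (if 1 ≤ x ∧ x ≤ W - 2 then (st.1 ++ [(x, H - 1)], st.2) else st)
      else if H - 1 ≤ H - 3 then (st.1 ++ [(x, H - 1)], st.2)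
      else if H - 1 = H - 2 then (st.1, st.2 ++ [(x, H - 1)])
      else
        (if 1 ≤ x ∧ x ≤ W - 2 then (st.1, st.2 ++ [(x, H - 1)]) else st))
      = (fun st x => if 1 ≤ x ∧ x ≤ W - 2 then (st.1, st.2 ++ [(x, H - 1)]) else st) := by
    funext st x
    rw [if_neg (by omega : ¬ H - 1 = 0), if_neg (by omega : ¬ H - 1 ≤ H - 3),
      if_neg (by omega : ¬ H - 1 = H - 2)]
  rw [hf, foldl_pair_snd_if (fun x => 1 ≤ x ∧ x ≤ W - 2) (fun x => (x, H - 1)), filter_inner]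

-- folding A's row over the body rows flat-maps the full bands onto `initial`
theorem foldl_mageRow_mid (W H : Int) (l : List Int) (hl : ∀ y ∈ l, 1 ≤ y ∧ y ≤ H - 3)
    (i e : List (Int × Int)) :
    l.foldl (mageRow W H) (i, e)
      = (i ++ l.flatMap (fun y => (PySem.List.pyRange 0 W 1).map (fun x => (x, y))), e) := by
  induction l generalizing i with
  | nil => simp
  | cons a l ih =>
    have ha := hl a (by simp)
    simp only [List.foldl_cons, mageRow_mid W H a ha.1 ha.2 i e]
    rw [ih (fun y hy => hl y (by simp [hy]))]
    simp [List.append_assoc]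

theorem mage_eq (W H : Int) : mage_shape_standard W H = mage_shape_standard_alt W H := by
  unfold mage_shape_standard mage_shape_standard_alt
  rcases le_or_gt H 0 with h0 | h0
  · have e1 : PySem.List.pyRange 0 H 1 = [] := PySem.List.pyRange_one_eq_nil (by omega)
    have e2 : PySem.List.pyRange 1 (H - 2) 1 = [] := PySem.List.pyRange_one_eq_nil (by omega)
    rw [e1, e2]
    simp [if_neg (show ¬ H ≥ 1 by omega), if_neg (show ¬ H ≥ 3 by omega),
      if_neg (show ¬ H ≥ 2 by omega)]
  · by_cases h1 : H = 1
    · subst h1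
      have e1 : PySem.List.pyRange 0 1 1 = [(0 : Int)] := PySem.List.pyRange_one_singleton 0
      have e2 : PySem.List.pyRange 1 ((1 : Int) - 2) 1 = [] := PySem.List.pyRange_one_eq_nil (by omega)
      rw [e1, e2]
      simp only [List.foldl_cons, List.foldl_nil]
      rw [mageRow_zero]
      simp
    · by_cases h2 : H = 2
      · subst h2
        have e1 : PySem.List.pyRange 0 2 1 = [(0 : Int), 2 - 1] := by
          rw [PySem.List.pyRange_one_cons (by omega), PySem.List.pyRange_one_cons (by omega),
            PySem.List.pyRange_one_eq_nil (by omega)]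
          norm_num
        have e2 : PySem.List.pyRange 1 ((2 : Int) - 2) 1 = [] := PySem.List.pyRange_one_eq_nil (by omega)
        rw [e1, e2]
        simp only [List.foldl_cons, List.foldl_nil]
        rw [mageRow_zero, mageRow_last W 2 (by omega)]
        simp
      · have hH : 3 ≤ H := by omega
        have hsplit : PySem.List.pyRange 0 H 1
            = [(0 : Int)] ++ PySem.List.pyRange 1 (H - 2) 1 ++ [H - 2, H - 1] := by
          have e1 : PySem.List.pyRange (H - 2) H 1 = [H - 2, H - 1] := by
            rw [PySem.List.pyRange_one_cons (by omega), PySem.List.pyRange_one_cons (by omega),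
              PySem.List.pyRange_one_eq_nil (by omega)]
            norm_num
            omega
          have e0 : PySem.List.pyRange 0 H 1 = 0 :: PySem.List.pyRange 1 H 1 :=
            PySem.List.pyRange_one_cons (by omega)
          have em : PySem.List.pyRange 1 H 1
              = PySem.List.pyRange 1 (H - 2) 1 ++ PySem.List.pyRange (H - 2) H 1 :=
            PySem.List.pyRange_one_append 1 (H - 2) H (by omega) (by omega)
          rw [e0, em, e1]
          simp
        rw [hsplit]
        simp only [List.foldl_append, List.foldl_cons, List.foldl_nil]
        rw [mageRow_zero]
        rw [foldl_mageRow_mid W H _ (fun y hy => by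
          have := (PySem.List.mem_pyRange_one).mp hy; omega)]
        rw [mageRow_exp W H hH, mageRow_last W H (by omega)]
        simp [if_pos (show H ≥ 1 by omega), if_pos (show H ≥ 3 by omega),
          if_pos (show H ≥ 2 by omega)]

-- ===== VERDICT (by name: the statement is the Claim_ definition above) =====
theorem mage_shape_standard_spec : Claim_equal_mage_shape_standard := by
  intro W H _
  unfold Spec_mage_shape_standard
  exact mage_eq W H
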